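-- pv_equiv track=rewrite | github.com/Angel0703over/threat0905 | pre_track.py | _convert_to_list_str
-- ===== SOURCE A (Python) =====
-- def _convert_to_list_str(tracks):
--
--     data = []
--     keys = list(tracks.keys())
--
--     for i in range(len(tracks[keys[0]])):
--         entry = []
--         for key in keys:
--             # 如果key对应的列表为空，添加一个默认值（比如空字符串）
--             if len(tracks[key]) > i:
--                 entry.append(str(tracks[key][i]))
--             else:
--                 entry.append("")
--         data.append(entry)
--     return data
-- ===== SOURCE B (Python) =====
-- def _convert_to_list_str(tracks):
--     keys = list(tracks.keys())
--     n = len(tracks[keys[0]])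
--     # one stringified column per key, padded/truncated to exactly n entries
--     cols = [[str(v) for v in tracks[k][:n]] + [""] * (n - len(tracks[k])) for k in keys]
--     return [list(row) for row in zip(*cols)]
-- ===== Notes on version B (the rewrite author's own statement) =====
-- stated objective: idiomatic
-- what changed: Instead of row-by-row nested indexing with a per-cell length guard, B builds one padded/truncated column per key and transposes all columns in a single zip(*cols) pass.
import Mathlib
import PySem

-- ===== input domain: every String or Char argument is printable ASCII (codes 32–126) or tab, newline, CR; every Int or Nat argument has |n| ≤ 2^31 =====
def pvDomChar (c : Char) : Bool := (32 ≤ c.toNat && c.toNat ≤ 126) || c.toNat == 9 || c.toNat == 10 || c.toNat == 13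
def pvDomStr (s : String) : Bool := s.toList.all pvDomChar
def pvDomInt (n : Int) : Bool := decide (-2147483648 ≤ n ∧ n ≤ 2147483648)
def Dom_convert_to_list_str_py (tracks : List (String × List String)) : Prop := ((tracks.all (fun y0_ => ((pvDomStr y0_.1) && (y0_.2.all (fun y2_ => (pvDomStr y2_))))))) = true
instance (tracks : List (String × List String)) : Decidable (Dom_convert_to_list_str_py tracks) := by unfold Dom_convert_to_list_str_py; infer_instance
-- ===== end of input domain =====

-- B replaces A's row-by-row nested indexing with per-key padded columns transposed in one
-- zip pass (objective: idiomatic). Equivalence of RETURN values on non-empty dicts.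

-- ===== PORT A =====
-- dict lookup: first match on the association list; keys = list(tracks.keys()) in order.
def convert_to_list_str_py (tracks : List (String × List String)) : List (List String) :=
  let keys := PySem.List.dedup (tracks.map Prod.fst)
  match keys with
  | [] => []  -- keys[0] raises IndexError in Python; excluded by Pre_
  | k0 :: _ =>
    (PySem.List.pyRange 0 (((tracks.lookup k0).getD []).length : Int) 1).foldl
      (fun data i =>
        data ++ [keys.foldl (fun entry key =>
          let vs := (tracks.lookup key).getD []
          -- str(vs[i]) with vs[i] : String is vs[i] itself (exact)
          entry ++ [if i < (vs.length : Int) then PySem.List.pyGetD vs i "" else ""]) []])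
      []

-- ===== PORT B =====
-- zip(*cols): every column has exactly length n by construction (sliced to n, padded to n),
-- so zip's min-length truncation is transcription-exact with n steps.
def zipColsB : Nat → List (List String) → List (List String)
  | 0, _ => []
  | n+1, cols => cols.map (fun c => c.headD "") :: zipColsB n (cols.map List.tail)

def convert_to_list_str_py_alt (tracks : List (String × List String)) : List (List String) :=
  let keys := PySem.List.dedup (tracks.map Prod.fst)
  match keys with
  | [] => []  -- keys[0] raises IndexError in Python; excluded by Pre_
  | k0 :: _ =>
    let n := ((tracks.lookup k0).getD []).length
    let cols := keys.map (fun k =>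
      let vs := (tracks.lookup k).getD []
      PySem.List.slice vs none (some (n : Int)) ++ List.replicate (n - vs.length) "")
    zipColsB n cols

-- ===== PRECONDITION & SPEC =====
-- Python A raises IndexError (keys[0]) exactly on the empty dict; nothing else raises.
def Pre_convert_to_list_str_py (tracks : List (String × List String)) : Prop := tracks ≠ []
instance (tracks : List (String × List String)) : Decidable (Pre_convert_to_list_str_py tracks) := by unfold Pre_convert_to_list_str_py; infer_instance
def pvWitness_convert_to_list_str_py : (List (String × List String)) := [("a", ["1", "2"]), ("b", ["x"])]

def Spec_convert_to_list_str_py (tracks : List (String × List String)) (out : List (List String)) : Prop := out = convert_to_list_str_py_alt tracks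
instance (tracks : List (String × List String)) (out : List (List String)) : Decidable (Spec_convert_to_list_str_py tracks out) := by unfold Spec_convert_to_list_str_py; infer_instance

-- ===== CLAIM (what is proved, stated in full; the proofs are below) =====
def Claim_equal_convert_to_list_str_py : Prop := ∀ (tracks : List (String × List String)), Dom_convert_to_list_str_py tracks → Pre_convert_to_list_str_py tracks → Spec_convert_to_list_str_py tracks (convert_to_list_str_py tracks)

-- ===== LEMMAS AND PROOFS =====

-- zipColsB indexed characterisation
theorem zipColsB_eq_range_map (n : Nat) (cols : List (List String)) :
    zipColsB n cols = (List.range n).map (fun j => cols.map (fun c => c.getD j "")) := by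
  induction n generalizing cols with
  | zero => simp [zipColsB]
  | succ m ih =>
    rw [List.range_succ_eq_map]
    simp only [zipColsB, ih, List.map_cons, List.map_map]
    congr 1
    · apply List.map_congr_left; intro c _; cases c <;> rfl
    · apply List.map_congr_left; intro j _
      apply List.map_congr_left; intro c _; cases c <;> rfl

-- a padded/truncated column indexed below n agrees with plain getD
theorem col_getD (vs : List String) (n j : Nat) (hj : j < n) :
    (vs.take n ++ List.replicate (n - vs.length) "").getD j "" = vs.getD j "" := by
  by_cases h : j < vs.length
  · rw [List.getD_eq_getElem?_getD, List.getD_eq_getElem?_getD,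
      List.getElem?_append_left (by simp; omega), List.getElem?_take]
    simp [hj]
  · rw [List.getD_eq_getElem?_getD, List.getD_eq_getElem?_getD,
      List.getElem?_append_right (by simp; omega)]
    simp only [List.getElem?_replicate, List.length_take]
    rw [if_pos (by omega), List.getElem?_eq_none (by omega : vs.length ≤ j)]
    rfl

-- A's nested fold as a range-map of rows
theorem a_rows (keys : List String) (tracks : List (String × List String)) (n : Nat) :
    (PySem.List.pyRange 0 (n : Int) 1).foldl
      (fun data i =>
        data ++ [keys.foldl (fun entry key =>
          let vs := (tracks.lookup key).getD []
          entry ++ [if i < (vs.length : Int) then PySem.List.pyGetD vs i "" else ""]) []])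
      []
    = (List.range n).map (fun j => keys.map (fun key => ((tracks.lookup key).getD []).getD j "")) := by
  rw [PySem.List.foldl_append_singleton_eq_map, List.nil_append, PySem.List.pyRange_zero_natCast,
    List.map_map]
  apply List.map_congr_left
  intro j _
  simp only [Function.comp]
  rw [PySem.List.foldl_append_singleton_eq_map, List.nil_append]
  apply List.map_congr_left
  intro key _
  simp only [PySem.List.pyGetD_natCast]
  split_ifs with h
  · rfl
  · rw [List.getD_eq_getElem?_getD, List.getElem?_eq_none (by exact_mod_cast Int.not_lt.mp h)]
    rfl

-- ===== VERDICT (by name: the statement is the Claim_ definition above) =====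
theorem convert_to_list_str_py_spec : Claim_equal_convert_to_list_str_py := by
  intro tracks _ _
  unfold Spec_convert_to_list_str_py convert_to_list_str_py convert_to_list_str_py_alt
  cases h : PySem.List.dedup (tracks.map Prod.fst) with
  | nil => rfl
  | cons k0 rest =>
    simp only
    rw [a_rows, zipColsB_eq_range_map]
    apply List.map_congr_left
    intro j hj
    rw [List.map_map]
    apply List.map_congr_left
    intro key _
    simp only [Function.comp]
    rw [PySem.List.slice_to_natCast, col_getD _ _ _ (List.mem_range.mp hj)]
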